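-- pv_equiv track=rewrite | github.com/JarretYoung/Perfect-Matchups | perfectMatchup.py | counting_sort_string
-- ===== SOURCE A (Python) =====
-- def counting_sort_string(string_list, column):
--     """
--     This is a counting sort algorithm that sorts characters in a list while maintaining its order.
--     - First a bucket list with 27 spaces for 26 letters and one padded letter
--     - The frequency of each letter (and pad) is calculated
--     - Iterate through all the letters in bucket list to find the frequency of each letter to insert into the output
--         - When the frequency is found (>0) then the string list would be iterated through until a match is found
--             - The letter in the string list is removed and inserted into the output list
--     - After all the characters is inserted back into the output list, return the output list
--
--     :Input:
--         :param string_list: Is the list of characters to be sorted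
--         :param column:      Is the current column (index) being analysed
--
--     :return: output_list:   Is a list of the "sorted" list based on the current column (index)
--
--     Time complexity:
--         Worst: O(M)
--     Space complexity:
--         Aux: O(M)
--     """
--     number_of_letters_in_alphabet = 26  # Time: O(1)
--     code_for_A = ord('A')  # Time: O(1)
--
--     # Initialising bucket
--     bucket_list = [0] * (number_of_letters_in_alphabet + 1)  # Add 1 for padded number | Time: O(1)  Space: O(1)
--
--     # Counting the frequency of letters
--     for word in string_list:  # Time: O(M)
--         letter_worth = 0  # Time: O(1)
--         if column < len(word):  # Time: O(1)
--             letter_worth = ord(word[column]) - code_for_A + 1  # Time: O(1)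
--         bucket_list[letter_worth] += 1  # Time: O(1)
--
--     # Prepping output
--     output_list = []  # Space: O(M)
--     for i in range(0, len(bucket_list)):  # Time: O(1)
--         # Letter to be inserted based on index of bucket
--         insert_letter = i  # Time: O(1)
--         frequency = bucket_list[i]  # Time: O(1)
--         # Index used to traverse the input (to find a matching letter)
--         traverse_string_list_index = 0  # Space: O(1)
--
--         # Keep inserting items of this alphabet until reach frequency
--         while frequency != 0:
--             # Default the letter at 0 (padding letter) and increment based on the current letter in column
--             letter = 0  # Time: O(1)
--             if column < len(string_list[traverse_string_list_index]):  # Time: O(1)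
--                 letter = ord(string_list[traverse_string_list_index][column]) - code_for_A + 1  # Time: O(1)
--
--             # If matching letters then remove from old list (input) and into new list (output)
--             if letter == insert_letter:  # Time: O(1)
--                 output_list.append(string_list[traverse_string_list_index])  # Time: O(1)
--                 string_list.pop(traverse_string_list_index)  # Time: O(1)
--                 # Decrement the frequency to be able to terminate loop
--                 frequency -= 1  # Time: O(1)
--             else:
--                 # Increment traversing index to signal for next string
--                 traverse_string_list_index += 1  # Time: O(1)
--
--     return output_list  # Time: O(1)
-- ===== SOURCE B (Python) =====
-- def counting_sort_string(string_list, column):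
--     """Stable bucket/counting sort by the character in `column`: distribute each
--     word once into one of 27 buckets (pad + 'A'..'Z'), then concatenate the
--     buckets.  Single pass, no rescans, no pops (does not mutate string_list)."""
--     buckets = [[] for _ in range(27)]
--     for word in string_list:
--         k = 0
--         if column < len(word):
--             k = ord(word[column]) - ord('A') + 1
--         buckets[k].append(word)
--     output_list = []
--     for bucket in buckets:
--         output_list.extend(bucket)
--     return output_list
-- ===== Notes on version B (the rewrite author's own statement) =====
-- stated objective: faster
-- what changed: A counts frequencies and then, for each of the 27 buckets, repeatedly rescans the list from the front and pops each matching element; B distributes each word once into one of 27 bucket lists and concatenates them, removing all rescans and pops (B does not mutate string_list; equivalence is about the return value).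
import Mathlib
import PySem

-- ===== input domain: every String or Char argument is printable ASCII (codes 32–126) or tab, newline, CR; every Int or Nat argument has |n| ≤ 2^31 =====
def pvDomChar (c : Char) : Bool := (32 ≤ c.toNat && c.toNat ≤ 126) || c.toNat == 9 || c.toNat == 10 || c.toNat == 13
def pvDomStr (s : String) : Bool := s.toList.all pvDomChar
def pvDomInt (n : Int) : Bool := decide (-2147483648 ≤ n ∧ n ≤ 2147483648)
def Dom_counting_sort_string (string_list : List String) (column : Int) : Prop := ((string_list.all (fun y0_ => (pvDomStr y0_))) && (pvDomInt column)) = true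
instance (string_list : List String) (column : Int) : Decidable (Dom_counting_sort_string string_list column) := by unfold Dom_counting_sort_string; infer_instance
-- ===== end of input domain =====

-- B replaces A's 27 rescans-with-pop by a single distribution pass into 27 buckets (faster per the
-- timing run); A empties its argument list in place, B does not — equivalence is about the RETURN value.

-- ===== PORT A =====
-- letter_worth / letter: 0 for the pad (column beyond the word), else ord(word[column]) - ord('A') + 1.
-- Appears verbatim twice in A (and once in B); 0 on IndexError (column < -len), excluded by Pre_.
def letterWorth (column : Int) (word : String) : Int :=
  if column < PySem.Str.len word then
    match PySem.Str.pyGet? word column with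
    | some c => (c.toNat : Int) - 65 + 1
    | none => 0
  else 0

-- the inner `while frequency != 0` loop of A: scan string_list from traverse index `ti`,
-- pop a match into the output and decrement frequency, else advance `ti`.
-- `none` from pyGet? is Python's IndexError (unreachable under Pre_): we stop there.
def csAExtract (column : Int) (i : Nat) : Nat → List String → List String → Nat → List String × List String
  | 0, lst, out, _ => (lst, out)
  | freq + 1, lst, out, ti =>
    match h : PySem.List.pyGet? lst (ti : Int) with
    | none => (lst, out)                     -- Python raises IndexError here
    | some w =>
      if letterWorth column w = (i : Int) then
        csAExtract column i freq (lst.eraseIdx ti) (out ++ [w]) ti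
      else
        csAExtract column i (freq + 1) lst out (ti + 1)
  termination_by freq lst out ti => freq + (lst.length - ti)
  decreasing_by
  · rw [PySem.List.pyGet?_natCast] at h
    have hlt : ti < lst.length := (List.getElem?_eq_some_iff.mp h).1
    simp [List.length_eraseIdx, hlt]; omega
  · rw [PySem.List.pyGet?_natCast] at h
    have hlt : ti < lst.length := (List.getElem?_eq_some_iff.mp h).1
    omega

-- bucket_list[letter_worth] += 1 (Python raises IndexError out of [0,27); a negative in-range
-- index would wrap, but every such input makes A's phase 2 raise later — all excluded by Pre_)
def csAInc (column : Int) (b : List Nat) (word : String) : List Nat :=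
  let lw := letterWorth column word
  if 0 ≤ lw ∧ lw.toNat < b.length then b.set lw.toNat (b.getD lw.toNat 0 + 1) else b

def counting_sort_string (string_list : List String) (column : Int) : List String :=
  let bucket_list : List Nat := List.replicate (26 + 1) 0
  let bucket_list := string_list.foldl (csAInc column) bucket_list
  let st := (List.range bucket_list.length).foldl
      (fun (st : List String × List String) i =>
        csAExtract column i (bucket_list.getD i 0) st.1 st.2 0)
      (string_list, [])
  st.2

-- ===== PORT B =====
-- buckets[k].append(word); negative k wraps as in Python (out of range = IndexError, unreachable under Pre_)
def csBAdd (column : Int) (buckets : List (List String)) (word : String) : List (List String) :=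
  let k := letterWorth column word
  let idx := if k < 0 then k + buckets.length else k
  if 0 ≤ idx ∧ idx.toNat < buckets.length then
    buckets.set idx.toNat (buckets.getD idx.toNat [] ++ [word])
  else buckets

def counting_sort_string_alt (string_list : List String) (column : Int) : List String :=
  let buckets : List (List String) := (List.range 27).map (fun _ => [])
  let buckets := string_list.foldl (csBAdd column) buckets
  buckets.foldl (fun out b => out ++ b) []

-- ===== PRECONDITION & SPEC =====
-- Pre_ is exactly where the Python A returns: every word reached by `column` must yield a char
-- (no IndexError from column < -len) whose code is in [64,90] ('@','A'..'Z'), otherwise A's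
-- bucket indexing raises IndexError (immediately, or in phase 2 after a negative-index wrap).
def Pre_counting_sort_string (string_list : List String) (column : Int) : Prop :=
  ∀ w ∈ string_list, column < PySem.Str.len w →
    (PySem.Str.pyGet? w column).any (fun c => 64 ≤ c.toNat && c.toNat ≤ 90) = true
instance (string_list : List String) (column : Int) : Decidable (Pre_counting_sort_string string_list column) := by unfold Pre_counting_sort_string; infer_instance

def pvWitness_counting_sort_string : List String × Int := (["BA", "AB", "", "B@", "AB"], 0)

def Spec_counting_sort_string (string_list : List String) (column : Int) (out : List String) : Prop := out = counting_sort_string_alt string_list column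
instance (string_list : List String) (column : Int) (out : List String) : Decidable (Spec_counting_sort_string string_list column out) := by unfold Spec_counting_sort_string; infer_instance

-- ===== CLAIM (what is proved, stated in full; the proofs are below) =====
def Claim_equal_counting_sort_string : Prop := ∀ (string_list : List String) (column : Int), Dom_counting_sort_string string_list column → Pre_counting_sort_string string_list column → Spec_counting_sort_string string_list column (counting_sort_string string_list column)

-- ===== LEMMAS AND PROOFS =====
-- key bounds under Pre_
theorem lw_bounds (column : Int) (w : String)
    (h : column < PySem.Str.len w →
      (PySem.Str.pyGet? w column).any (fun c => 64 ≤ c.toNat && c.toNat ≤ 90) = true) :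
    0 ≤ letterWorth column w ∧ letterWorth column w ≤ 26 := by
  unfold letterWorth
  split
  · rename_i hlt
    have h2 := h hlt
    cases ho : PySem.Str.pyGet? w column with
    | none => rw [ho] at h2; simp [Option.any] at h2
    | some c =>
      rw [ho] at h2
      simp only [Option.any, Bool.and_eq_true, decide_eq_true_eq] at h2
      show 0 ≤ ((c.toNat : Int) - 65 + 1) ∧ ((c.toNat : Int) - 65 + 1) ≤ 26
      omega
  · omega

theorem eraseIdx_append_length {α : Type} (pre : List α) (w : α) (rest : List α) :
    (pre ++ w :: rest).eraseIdx pre.length = pre ++ rest := by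
  induction pre with
  | nil => simp
  | cons a t ih => simp [List.eraseIdx, ih]

-- A's inner while-loop, under the exact frequency: extracts the matching elements in order
theorem extract_eq (column : Int) (i : Nat) :
    ∀ (suf pre out : List String),
    csAExtract column i (suf.countP (fun w => letterWorth column w = (i : Int)))
        (pre ++ suf) out pre.length
      = (pre ++ suf.filter (fun w => ¬ letterWorth column w = (i : Int)),
         out ++ suf.filter (fun w => letterWorth column w = (i : Int))) := by
  intro suf
  induction suf with
  | nil => intro pre out; simp [csAExtract]
  | cons w rest ih =>
    intro pre out
    by_cases hw : letterWorth column w = (i : Int)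
    · have hc : (w :: rest).countP (fun w => letterWorth column w = (i : Int))
          = rest.countP (fun w => letterWorth column w = (i : Int)) + 1 := by
        simp [List.countP_cons, hw]
      rw [hc, csAExtract]
      rw [PySem.List.pyGet?_append_length]
      simp only [hw, if_pos rfl]
      rw [eraseIdx_append_length]
      rw [ih pre (out ++ [w])]
      simp [hw]
    · have hc : (w :: rest).countP (fun w => letterWorth column w = (i : Int))
          = rest.countP (fun w => letterWorth column w = (i : Int)) := by
        simp [List.countP_cons, hw]
      rw [hc]
      cases hr : rest.countP (fun w => letterWorth column w = (i : Int)) with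
      | zero =>
        have hall := List.countP_eq_zero.mp hr
        rw [csAExtract]
        have h1 : rest.filter (fun w => !decide (letterWorth column w = (i : Int))) = rest := by
          apply List.filter_eq_self.mpr
          intro a ha; simpa using hall a ha
        have h2 : rest.filter (fun w => letterWorth column w = (i : Int)) = [] := by
          apply List.filter_eq_nil_iff.mpr
          intro a ha; simpa using hall a ha
        simp [List.filter_cons, hw, h1, h2]
      | succ n =>
        rw [csAExtract]
        rw [PySem.List.pyGet?_append_length]
        simp only []
        rw [if_neg hw]
        have hsplit : pre ++ w :: rest = (pre ++ [w]) ++ rest := by simp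
        have hlen : pre.length + 1 = (pre ++ [w]).length := by simp
        rw [hsplit, hlen]
        have ih' := ih (pre ++ [w]) out
        rw [hr] at ih'
        rw [ih']
        simp [hw]

-- phase 1 of A: bucket_list[j] counts the words with key j
theorem phase1_count (column : Int) :
    ∀ (l : List String) (init : List Nat), init.length = 27 →
    (∀ w ∈ l, 0 ≤ letterWorth column w ∧ letterWorth column w ≤ 26) →
    ∀ j : Nat, j < 27 →
    (l.foldl (csAInc column) init).getD j 0 =
      init.getD j 0 + l.countP (fun w => letterWorth column w = (j : Int)) := by
  intro l
  induction l with
  | nil => intro init hlen hk j hj; simp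
  | cons w t ih =>
    intro init hlen hk j hj
    have hw := hk w (by simp)
    have hcond : 0 ≤ letterWorth column w ∧ (letterWorth column w).toNat < init.length := by
      constructor
      · exact hw.1
      · rw [hlen]; omega
    have hstep : csAInc column init w =
        init.set (letterWorth column w).toNat (init.getD (letterWorth column w).toNat 0 + 1) := by
      simp [csAInc, hcond]
    rw [List.foldl_cons, hstep]
    rw [ih _ (by simp [hlen]) (fun a ha => hk a (by simp [ha])) j hj]
    rw [List.countP_cons]
    have hjlt : j < init.length := by omega
    have hklt : (letterWorth column w).toNat < init.length := hcond.2
    by_cases he : letterWorth column w = (j : Int)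
    · have hKj : (letterWorth column w).toNat = j := by omega
      simp [List.getD_eq_getElem?_getD, List.getElem?_set, hjlt, hklt, hKj, he,
        List.getElem?_eq_getElem]
      omega
    · have hne : (letterWorth column w).toNat ≠ j := by
        intro hcon; apply he; omega
      simp [List.getD_eq_getElem?_getD, List.getElem?_set, hjlt, hklt, hne, he,
        List.getElem?_eq_getElem]

theorem length_foldl_csAInc (column : Int) (l : List String) (init : List Nat) :
    (l.foldl (csAInc column) init).length = init.length := by
  induction l generalizing init with
  | nil => rfl
  | cons w t ih =>
    rw [List.foldl_cons, ih]
    simp only [csAInc]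
    split <;> simp

-- B's distribution pass: bucket j collects exactly the words with key j, in order
theorem phaseB (column : Int) :
    ∀ (l : List String) (init : List (List String)), init.length = 27 →
    (∀ w ∈ l, 0 ≤ letterWorth column w ∧ letterWorth column w ≤ 26) →
    ∀ j : Nat, j < 27 →
    (l.foldl (csBAdd column) init).getD j [] =
      init.getD j [] ++ l.filter (fun w => letterWorth column w = (j : Int)) := by
  intro l
  induction l with
  | nil => intro init hlen hk j hj; simp
  | cons w t ih =>
    intro init hlen hk j hj
    have hw := hk w (by simp)
    have hidx : (if letterWorth column w < 0 then letterWorth column w + (init.length : Int)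
        else letterWorth column w) = letterWorth column w := by
      rw [if_neg]; omega
    have hcond : (0 ≤ letterWorth column w ∧ (letterWorth column w).toNat < init.length) := by
      constructor
      · exact hw.1
      · rw [hlen]; omega
    have hstep : csBAdd column init w =
        init.set (letterWorth column w).toNat
          (init.getD (letterWorth column w).toNat [] ++ [w]) := by
      simp only [csBAdd, hidx, hcond, and_self, if_pos]
    rw [List.foldl_cons, hstep]
    rw [ih _ (by simp [hlen]) (fun a ha => hk a (by simp [ha])) j hj]
    rw [List.filter_cons]
    have hjlt : j < init.length := by omega
    have hklt : (letterWorth column w).toNat < init.length := hcond.2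
    by_cases he : letterWorth column w = (j : Int)
    · have hKj : (letterWorth column w).toNat = j := by omega
      simp [List.getD_eq_getElem?_getD, List.getElem?_set, hjlt, hklt, hKj, he,
        List.getElem?_eq_getElem]
    · have hne : (letterWorth column w).toNat ≠ j := by
        intro hcon; apply he; omega
      simp [List.getD_eq_getElem?_getD, List.getElem?_set, hjlt, hklt, hne, he,
        List.getElem?_eq_getElem]

theorem length_foldl_csBAdd (column : Int) (l : List String) (init : List (List String)) :
    (l.foldl (csBAdd column) init).length = init.length := by
  induction l generalizing init with
  | nil => rfl
  | cons w t ih =>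
    rw [List.foldl_cons, ih]
    simp only [csBAdd]
    split <;> split <;> simp

theorem flatMap_congr_mem {α β : Type} (l : List α) (f g : α → List β)
    (h : ∀ a ∈ l, f a = g a) : l.flatMap f = l.flatMap g := by
  induction l with
  | nil => rfl
  | cons a t ih =>
    simp only [List.flatMap_cons]
    rw [h a (by simp), ih (fun b hb => h b (by simp [hb]))]

-- phase 2 of A: the fold over the buckets emits, for each key in turn, its elements in order
theorem outer_fold (column : Int) (cnt : List Nat) :
    ∀ (js : List Nat) (lst out : List String), js.Nodup →
    (∀ j ∈ js, cnt.getD j 0 = lst.countP (fun w => letterWorth column w = (j : Int))) →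
    js.foldl (fun (st : List String × List String) i =>
        csAExtract column i (cnt.getD i 0) st.1 st.2 0) (lst, out)
      = (lst.filter (fun w => decide (∀ j ∈ js, ¬ letterWorth column w = (j : Int))),
         out ++ js.flatMap (fun (j : Nat) => lst.filter (fun w => letterWorth column w = (j : Int)))) := by
  intro js
  induction js with
  | nil => intro lst out _ _; simp
  | cons i rest ih =>
    intro lst out hnd hcnt
    rw [List.foldl_cons]
    have h0 : csAExtract column i (cnt.getD i 0) lst out 0
        = (lst.filter (fun w => ¬ letterWorth column w = (i : Int)),
           out ++ lst.filter (fun w => letterWorth column w = (i : Int))) := by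
      rw [hcnt i (by simp)]
      have := extract_eq column i lst [] out
      simpa using this
    rw [h0]
    have hnotin : i ∉ rest := (List.nodup_cons.mp hnd).1
    have hcnt' : ∀ j ∈ rest,
        cnt.getD j 0 = (lst.filter (fun w => ¬ letterWorth column w = (i : Int))).countP
          (fun w => letterWorth column w = (j : Int)) := by
      intro j hj
      rw [List.countP_filter]
      rw [hcnt j (by simp [hj])]
      apply List.countP_congr
      intro a _
      have hji : j ≠ i := fun hcon => hnotin (hcon ▸ hj)
      by_cases ha : letterWorth column a = (j : Int)
      · have hne2 : ¬ letterWorth column a = (i : Int) := by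
          rw [ha]; intro hcon; exact hji (by exact_mod_cast hcon)
        simp [ha, hne2, hji]
      · simp [ha]
    rw [ih _ _ (List.nodup_cons.mp hnd).2 hcnt']
    rw [Prod.mk.injEq]
    refine ⟨?_, ?_⟩
    · rw [List.filter_filter]
      apply List.filter_congr
      intro a _
      simp [List.forall_mem_cons, Bool.and_comm]
    · rw [List.append_assoc]
      congr 1
      rw [List.flatMap_cons]
      congr 1
      apply flatMap_congr_mem
      intro j hj
      rw [List.filter_filter]
      apply List.filter_congr
      intro a _
      have hji : j ≠ i := fun hcon => hnotin (hcon ▸ hj)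
      by_cases ha : letterWorth column a = (j : Int)
      · have hne2 : ¬ letterWorth column a = (i : Int) := by
          rw [ha]; intro hcon; exact hji (by exact_mod_cast hcon)
        simp [ha, hne2, hji]
      · simp [ha]

theorem foldl_append_acc {α : Type} :
    ∀ (bs : List (List α)) (acc : List α),
    bs.foldl (fun out b => out ++ b) acc = acc ++ bs.flatten := by
  intro bs
  induction bs with
  | nil => intro acc; simp
  | cons b t ih => intro acc; simp [ih, List.append_assoc]

-- ===== VERDICT (by name: the statement is the Claim_ definition above) =====
theorem counting_sort_string_spec : Claim_equal_counting_sort_string := by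
  intro string_list column _hdom hpre
  unfold Spec_counting_sort_string
  have hk : ∀ w ∈ string_list, 0 ≤ letterWorth column w ∧ letterWorth column w ≤ 26 :=
    fun w hw => lw_bounds column w (hpre w hw)
  -- A reduces to: for each key 0..26 in turn, the words with that key, in order
  have hblen : (string_list.foldl (csAInc column) (List.replicate (26 + 1) 0)).length = 27 := by
    rw [length_foldl_csAInc]; simp
  have hcnt : ∀ j ∈ List.range 27,
      (string_list.foldl (csAInc column) (List.replicate (26 + 1) 0)).getD j 0
        = string_list.countP (fun w => letterWorth column w = (j : Int)) := by
    intro j hj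
    have hj' : j < 27 := List.mem_range.mp hj
    rw [phase1_count column string_list _ (by simp) hk j hj']
    rw [List.getD_eq_getElem?_getD, List.getElem?_replicate]
    simp [hj']
  have hA : counting_sort_string string_list column
      = (List.range 27).flatMap
          (fun (j : Nat) => string_list.filter (fun w => letterWorth column w = (j : Int))) := by
    simp only [counting_sort_string]
    rw [hblen]
    rw [outer_fold column _ (List.range 27) string_list [] List.nodup_range hcnt]
    simp
  -- B reduces to the same canonical form
  have hbuck : string_list.foldl (csBAdd column) ((List.range 27).map (fun _ => []))
      = (List.range 27).map
          (fun (j : Nat) => string_list.filter (fun w => letterWorth column w = (j : Int))) := by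
    apply List.ext_getElem
    · rw [length_foldl_csBAdd]; simp
    · intro j h1 h2
      have hj : j < 27 := by
        have h1' := h1
        rw [length_foldl_csBAdd] at h1'
        simpa using h1'
      have hb := phaseB column string_list ((List.range 27).map (fun _ => []))
        (by simp) hk j hj
      rw [List.getD_eq_getElem?_getD, List.getElem?_eq_getElem h1] at hb
      simp only [Option.getD_some] at hb
      have hinit : ((List.range 27).map (fun _ => ([] : List String))).getD j [] = [] := by
        rw [List.getD_eq_getElem?_getD, List.getElem?_map]
        cases (List.range 27)[j]? <;> simp
      rw [hb, hinit]
      simp [List.getElem_map]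
  have hB : counting_sort_string_alt string_list column
      = (List.range 27).flatMap
          (fun (j : Nat) => string_list.filter (fun w => letterWorth column w = (j : Int))) := by
    simp only [counting_sort_string_alt]
    rw [hbuck, foldl_append_acc]
    simp [List.flatMap_def]
  rw [hA, hB]
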